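-- pv_equiv track=rewrite | github.com/jmgiannikos/DataLiteracyProject | src/extract_features.py | join_word_hists
-- ===== SOURCE A (Python) =====
-- from typing import List, Dict, Tuple, Optional
--
-- def join_word_hists(
--     word_hists: List[Dict[str, int]],
--     union: bool = True
-- ) -> List[Dict[str, int]]:
--     """
--     Unify word histograms to have the same vocabulary.
--
--     Args:
--         word_hists: List of word histogram dictionaries
--         union: If True, use union of all words (fill missing with 0).
--                If False, use intersection (only words in all documents).
--
--     Returns:
--         List of histograms with aligned vocabularies
--
--     Source: jan-analysis/csv_dataset_generator.py
--     """
--     if not word_hists: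
--         return []
--
--     # Build lexicon
--     lexicon = []
--     if union:
--         for word_hist in word_hists:
--             contained_words = list(word_hist.keys())
--             lexicon = list(set(lexicon + contained_words))
--     else:
--         for i, word_hist in enumerate(word_hists):
--             contained_words = list(word_hist.keys())
--             if i == 0:
--                 lexicon = contained_words
--             else:
--                 lexicon = list(set(lexicon) & set(contained_words))
--
--     # Align histograms to lexicon
--     joined_word_hists = []
--     for word_hist in word_hists:
--         joined_hist = {}
--         for word in lexicon:
--             joined_hist[word] = word_hist.get(word, 0)
--         joined_word_hists.append(joined_hist)
--
--     return joined_word_hists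
-- ===== SOURCE B (Python) =====
-- def join_word_hists(word_hists, union=True):
--     n = len(word_hists)
--     # Inverted index: word -> [(doc_index, count), ...] in first-occurrence order
--     columns = {}
--     for i, word_hist in enumerate(word_hists):
--         for word, count in word_hist.items():
--             columns.setdefault(word, []).append((i, count))
--     # Distribute each qualifying column back into every document row
--     rows = [{} for _ in range(n)]
--     for word, col in columns.items():
--         if union or len(col) == n:
--             placed = dict(col)
--             for i, row in enumerate(rows):
--                 row[word] = placed.get(i, 0)
--     return rows
-- ===== Notes on version B (the rewrite author's own statement) =====
-- stated objective: alternative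
-- what changed: B transposes the problem: one pass builds an inverted index word -> [(doc_index, count)] with setdefault/append, the lexicon is never materialised as a set (union = all index keys, intersection = columns whose posting list has one entry per document), and the output rows are built column-major by distributing each qualifying column into every row, instead of A's row-major scheme of building a lexicon by repeated list(set(...)) operations and then looking every lexicon word up in every histogram with .get.
import Mathlib
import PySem

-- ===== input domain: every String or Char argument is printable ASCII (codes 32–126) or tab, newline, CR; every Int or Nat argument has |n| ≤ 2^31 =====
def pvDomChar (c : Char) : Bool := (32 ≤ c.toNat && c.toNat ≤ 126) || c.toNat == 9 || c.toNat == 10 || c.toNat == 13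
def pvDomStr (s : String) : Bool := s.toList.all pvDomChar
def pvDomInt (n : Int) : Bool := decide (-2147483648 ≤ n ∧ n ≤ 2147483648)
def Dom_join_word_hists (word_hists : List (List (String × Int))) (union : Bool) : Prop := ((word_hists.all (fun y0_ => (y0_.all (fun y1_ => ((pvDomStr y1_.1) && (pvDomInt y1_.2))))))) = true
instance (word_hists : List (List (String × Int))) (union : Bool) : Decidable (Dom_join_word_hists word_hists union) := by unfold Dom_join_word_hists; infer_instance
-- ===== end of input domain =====

-- B transposes the task: one pass builds an inverted index word -> posting list of (doc index, count); the lexicon is read off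
-- the index (all keys / keys whose posting list has one entry per document) and each qualifying column is distributed back into
-- every document row, instead of A's set-algebra lexicon plus row-major .get lookup fill (objective: alternative).


-- ===== PORT A =====
def join_word_hists (word_hists : List (List (String × Int))) (union : Bool) : List (List (String × Int)) :=
  if word_hists = [] then []
  else
    let lexicon : List String :=
      if union then
        word_hists.foldl (fun lexicon word_hist =>
          PySem.Set.ofList (lexicon ++ (PySem.Dict.mk word_hist).keys)) []
      else
        (PySem.List.enumerate word_hists 0).foldl (fun lexicon iwh =>
          if iwh.1 = 0 then (PySem.Dict.mk iwh.2).keys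
          else PySem.Set.inter (PySem.Set.ofList lexicon) ((PySem.Dict.mk iwh.2).keys)) []
    word_hists.foldl (fun acc word_hist =>
      acc ++ [(lexicon.foldl (fun jh word =>
        jh.insert word ((PySem.Dict.mk word_hist).getD word 0)) PySem.Dict.empty).items]) []

-- ===== PORT B =====
-- (the in-place mutations 'columns.setdefault(word, []).append(...)' and 'row[word] = ...' inside
--  'for i, row in enumerate(rows)' are ported purely: Dict.modify, and a map over the enumerated rows)
def join_word_hists_alt (word_hists : List (List (String × Int))) (union : Bool) : List (List (String × Int)) :=
  let n := word_hists.length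
  let columns : PySem.Dict String (List (Int × Int)) :=
    (PySem.List.enumerate word_hists 0).foldl (fun cols ih =>
      (PySem.Dict.mk ih.2).items.foldl (fun cols wc =>
        cols.modify wc.1 [] (fun l => l ++ [(ih.1, wc.2)])) cols) PySem.Dict.empty
  let rows0 : List (PySem.Dict String Int) := List.replicate n PySem.Dict.empty
  let rows := columns.items.foldl (fun rows wcol =>
    if union || wcol.2.length == n then
      (PySem.List.enumerate rows 0).map (fun ir =>
        ir.2.insert wcol.1 ((PySem.Dict.ofList wcol.2).getD ir.1 0))
    else rows) rows0
  rows.map (fun r => r.items)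

-- ===== PRECONDITION & SPEC =====

-- ===== PRECONDITION & SPEC =====
-- Pre_ excludes association lists in which some histogram repeats a key: such lists cannot arise
-- from a Python dict (the Python argument type is List[Dict[str, int]]), so no input A's Python
-- returns on is excluded; on the Lean encoding the first-match vs last-match value would be an
-- accident of the encoding.
def Pre_join_word_hists (word_hists : List (List (String × Int))) (union : Bool) : Prop :=
  ∀ h ∈ word_hists, (h.map Prod.fst).Nodup
instance (word_hists : List (List (String × Int))) (union : Bool) : Decidable (Pre_join_word_hists word_hists union) := by unfold Pre_join_word_hists; infer_instance
def pvWitness_join_word_hists : (List (List (String × Int))) × Bool :=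
  ([[("a", 1), ("b", 2)], [("a", 3)]], true)
def Spec_join_word_hists (word_hists : List (List (String × Int))) (union : Bool) (out : List (List (String × Int))) : Prop := out = join_word_hists_alt word_hists union
instance (word_hists : List (List (String × Int))) (union : Bool) (out : List (List (String × Int))) : Decidable (Spec_join_word_hists word_hists union out) := by unfold Spec_join_word_hists; infer_instance

-- ===== CLAIM (what is proved, stated in full; the proofs are below) =====
def Claim_equal_join_word_hists : Prop := ∀ (word_hists : List (List (String × Int))) (union : Bool), Dom_join_word_hists word_hists union → Pre_join_word_hists word_hists union → Spec_join_word_hists word_hists union (join_word_hists word_hists union)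

-- ===== LEMMAS AND PROOFS =====

theorem columns_eq_flat (whs : List (List (String × Int))) :
    ((PySem.List.enumerate whs 0).foldl (fun cols ih =>
        (PySem.Dict.mk ih.2).items.foldl (fun cols wc =>
          cols.modify wc.1 [] (fun l => l ++ [(ih.1, wc.2)])) cols)
        (PySem.Dict.empty : PySem.Dict String (List (Int × Int))))
    = ((PySem.List.enumerate whs 0).flatMap (fun ih => ih.2.map (fun wc => (wc.1, (ih.1, wc.2))))).foldl
        (fun d p => d.modify p.1 [] (fun l => l ++ [p.2])) PySem.Dict.empty := by
  rw [List.foldl_flatMap]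
  simp only [List.foldl_map]

theorem dict_ofList_eq_mk {κ ν : Type} [BEq κ] [LawfulBEq κ] (l : List (κ × ν))
    (h : (l.map Prod.fst).Nodup) : PySem.Dict.ofList l = PySem.Dict.mk l := by
  apply PySem.Dict.ext
  have := PySem.Dict.items_foldl_insert_fresh l Prod.fst Prod.snd PySem.Dict.empty
    (fun a _ => PySem.Dict.contains_empty a.1) h
  simpa [PySem.Dict.ofList, PySem.Dict.update, PySem.Dict.items, PySem.Dict.empty] using this

theorem enumerate_map_enumerate {α β : Type} (l : List α) (s : Int) (g : Int × α → β) :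
    PySem.List.enumerate ((PySem.List.enumerate l s).map g) s
      = (PySem.List.enumerate l s).map (fun p => (p.1, g p)) := by
  induction l generalizing s with
  | nil => rfl
  | cons x xs ih => simp [PySem.List.enumerate_cons, ih (s+1)]

theorem flatMap_enumerate_snd {α β : Type} (l : List α) (s : Int) (g : α → List β) :
    (PySem.List.enumerate l s).flatMap (fun p => g p.2) = l.flatMap g := by
  induction l generalizing s with
  | nil => rfl
  | cons x xs ih => simp [PySem.List.enumerate_cons, ih (s+1)]

def pvColList (whs : List (List (String × Int))) (s : Int) (w : String) : List (Int × Int) :=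
  (PySem.List.enumerate whs s).flatMap (fun ih =>
    (ih.2.filter (fun wc => wc.1 == w)).map (fun wc => (ih.1, wc.2)))

theorem columns_getD (whs : List (List (String × Int))) (w : String) :
    ((PySem.List.enumerate whs 0).foldl (fun cols ih =>
        (PySem.Dict.mk ih.2).items.foldl (fun cols wc =>
          cols.modify wc.1 [] (fun l => l ++ [(ih.1, wc.2)])) cols)
        (PySem.Dict.empty : PySem.Dict String (List (Int × Int)))).getD w []
      = pvColList whs 0 w := by
  rw [columns_eq_flat]
  rw [PySem.Dict.getD_foldl_modify_append]
  simp only [pvColList, List.filter_flatMap, List.map_flatMap, List.filter_map, List.map_map,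
    PySem.Dict.getD_empty, List.nil_append]
  congr 1


theorem columns_keys (whs : List (List (String × Int))) :
    ((PySem.List.enumerate whs 0).foldl (fun cols ih =>
        (PySem.Dict.mk ih.2).items.foldl (fun cols wc =>
          cols.modify wc.1 [] (fun l => l ++ [(ih.1, wc.2)])) cols)
        (PySem.Dict.empty : PySem.Dict String (List (Int × Int)))).keys
      = PySem.Set.ofList (whs.flatMap (fun h => h.map Prod.fst)) := by
  rw [columns_eq_flat]
  rw [PySem.Dict.keys_foldl_modify_key _ Prod.fst [] (fun _ p l => l ++ [p.2])]
  rw [PySem.Dict.keys_empty, PySem.Set.update_nil_left]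
  congr 1
  simp only [List.map_flatMap, List.map_map]
  have : ∀ (a : Int × List (String × Int)),
      List.map (Prod.fst ∘ fun wc => (wc.1, a.1, wc.2)) a.2 = a.2.map Prod.fst := by
    intro a; simp [Function.comp]
  simp only [this]
  exact flatMap_enumerate_snd whs 0 (fun h => h.map Prod.fst)

theorem columns_keys_nodup (whs : List (List (String × Int))) :
    ((PySem.List.enumerate whs 0).foldl (fun cols ih =>
        (PySem.Dict.mk ih.2).items.foldl (fun cols wc =>
          cols.modify wc.1 [] (fun l => l ++ [(ih.1, wc.2)])) cols)
        (PySem.Dict.empty : PySem.Dict String (List (Int × Int)))).keys.Nodup := by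
  rw [columns_keys]
  exact PySem.Set.nodup_ofList _

theorem pvColList_cons (h : List (String × Int)) (t : List (List (String × Int))) (s : Int) (w : String) :
    pvColList (h :: t) s w
      = (h.filter (fun wc => wc.1 == w)).map (fun wc => (s, wc.2)) ++ pvColList t (s + 1) w := by
  simp [pvColList, PySem.List.enumerate_cons]

theorem pvColList_fst_ge (whs : List (List (String × Int))) (s : Int) (w : String) :
    ∀ p ∈ pvColList whs s w, s ≤ p.1 := by
  induction whs generalizing s with
  | nil => intro p hp; simp [pvColList] at hp
  | cons h t ih =>
    intro p hp
    rw [pvColList_cons] at hp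
    rcases List.mem_append.1 hp with hp | hp
    · obtain ⟨wc, _, rfl⟩ := List.mem_map.1 hp; exact le_refl s
    · have := ih (s+1) p hp; omega

theorem filter_key_of_nodup (h : List (String × Int)) (w : String)
    (hn : (h.map Prod.fst).Nodup) :
    h.filter (fun wc => wc.1 == w)
      = match (PySem.Dict.mk h).get? w with
        | some c => [(w, c)]
        | none => [] := by
  induction h with
  | nil => rfl
  | cons kv t ih =>
    obtain ⟨k, c⟩ := kv
    simp only [List.map_cons, List.nodup_cons] at hn
    obtain ⟨hk, hnt⟩ := hn
    rw [PySem.Dict.get?_mk_cons]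
    by_cases hkw : k = w
    · subst hkw
      have ht : t.filter (fun wc => wc.1 == k) = [] := by
        rw [List.filter_eq_nil_iff]
        intro wc hwc hbe
        exact hk (List.mem_map.2 ⟨wc, hwc, beq_iff_eq.1 hbe⟩)
      rw [List.filter_cons_of_pos (by simp)]
      simp [ht]
    · have hb : (k == w) = false := by simp [hkw]
      rw [List.filter_cons_of_neg (by simp [hkw]), hb]
      simpa using ih hnt

theorem pvColList_fst_nodup (whs : List (List (String × Int))) (s : Int) (w : String)
    (hpre : ∀ h ∈ whs, (h.map Prod.fst).Nodup) :
    ((pvColList whs s w).map Prod.fst).Nodup := by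
  induction whs generalizing s with
  | nil => simp [pvColList]
  | cons h t ih =>
    have hh := hpre h (by simp)
    have hrest := ih (s+1) (fun h' hh' => hpre h' (by simp [hh']))
    rw [pvColList_cons, filter_key_of_nodup h w hh]
    cases hg : (PySem.Dict.mk h).get? w with
    | none => simpa using hrest
    | some c =>
      simp only [List.map_cons, List.map_nil, List.singleton_append]
      rw [List.nodup_cons]
      refine ⟨?_, hrest⟩
      intro hmem
      obtain ⟨p, hp, hps⟩ := List.mem_map.1 hmem
      have := pvColList_fst_ge t (s+1) w p hp
      omega

theorem pvColList_getD (whs : List (List (String × Int))) (s : Int) (j : Nat) (w : String)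
    (hpre : ∀ h ∈ whs, (h.map Prod.fst).Nodup) (hj : j < whs.length) :
    (PySem.Dict.mk (pvColList whs s w)).getD (s + (j : Int)) 0
      = (PySem.Dict.mk whs[j]).getD w 0 := by
  induction whs generalizing s j with
  | nil => simp at hj
  | cons h t ih =>
    have hh := hpre h (by simp)
    rw [pvColList_cons]
    cases j with
    | zero =>
      simp only [List.getElem_cons_zero, Nat.cast_zero, add_zero]
      rw [filter_key_of_nodup h w hh]
      rw [PySem.Dict.getD_eq_get?_getD, PySem.Dict.getD_eq_get?_getD]
      cases hg : (PySem.Dict.mk h).get? w with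
      | some c =>
        simp only [List.map_cons, List.map_nil, List.singleton_append]
        rw [PySem.Dict.get?_mk_cons]
        simp
      | none =>
        simp only [List.map_nil, List.nil_append]
        have : (PySem.Dict.mk (pvColList t (s + 1) w)).get? s = none := by
          simp only [PySem.Dict.get?, Option.map_eq_none_iff, List.find?_eq_none]
          intro p hp hbe
          have h1 := pvColList_fst_ge t (s+1) w p hp
          have h2 : p.1 = s := beq_iff_eq.1 hbe
          omega
        rw [this]
    | succ j' =>
      simp only [List.getElem_cons_succ]
      have harith : s + ((j' + 1 : Nat) : Int) = (s + 1) + (j' : Int) := by push_cast; ring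
      rw [harith]
      rw [PySem.Dict.getD_eq_get?_getD]
      have hskip : (PySem.Dict.mk ((h.filter (fun wc => wc.1 == w)).map (fun wc => ((s : Int), wc.2)) ++ pvColList t (s+1) w)).get? ((s+1) + (j' : Int))
          = (PySem.Dict.mk (pvColList t (s+1) w)).get? ((s+1) + (j' : Int)) := by
        simp only [PySem.Dict.get?, List.find?_append]
        have hnone : ((h.filter (fun wc => wc.1 == w)).map (fun wc => ((s : Int), wc.2))).find?
            (fun p => p.1 == ((s+1) + (j' : Int))) = none := by
          rw [List.find?_eq_none]
          intro p hp
          obtain ⟨wc, hwc, rfl⟩ := List.mem_map.1 hp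
          simp only [beq_iff_eq]
          omega
        rw [hnone, Option.none_or]
      rw [hskip, ← PySem.Dict.getD_eq_get?_getD]
      exact ih (s+1) j' (fun h' hh' => hpre h' (by simp [hh'])) (by simpa using hj)

theorem pvColList_length (whs : List (List (String × Int))) (s : Int) (w : String)
    (hpre : ∀ h ∈ whs, (h.map Prod.fst).Nodup) :
    (pvColList whs s w).length = whs.countP (fun h => (h.map Prod.fst).contains w) := by
  induction whs generalizing s with
  | nil => simp [pvColList]
  | cons h t ih =>
    have hh := hpre h (by simp)
    rw [pvColList_cons, List.length_append, List.length_map,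
      filter_key_of_nodup h w hh, List.countP_cons,
      ih (s+1) (fun h' hh' => hpre h' (by simp [hh']))]
    have hcs : ((h.map Prod.fst).contains w) = ((PySem.Dict.mk h).get? w).isSome := by
      rw [← PySem.Dict.contains_eq_isSome_get?]
      simp [PySem.Dict.contains_eq_decide_mem_keys, PySem.Dict.keys]
    rw [hcs]
    cases hg : (PySem.Dict.mk h).get? w
    · simp
    · simp; omega

theorem lex_union_eq_update (whs : List (List (String × Int))) (s : List String) (hs : s.Nodup) :
    whs.foldl (fun lexicon word_hist =>
      PySem.Set.ofList (lexicon ++ (PySem.Dict.mk word_hist).keys)) s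
    = PySem.Set.update s (whs.flatMap (fun h => h.map Prod.fst)) := by
  induction whs generalizing s with
  | nil => simp [PySem.Set.update]
  | cons h t ih =>
    simp only [List.foldl_cons, List.flatMap_cons]
    rw [PySem.Set.ofList_append, PySem.Set.ofList_eq_self_of_nodup s hs,
      PySem.Set.update_append]
    have hk : (PySem.Dict.mk h).keys = h.map Prod.fst := by simp [PySem.Dict.keys]
    rw [hk] at *
    exact ih _ (PySem.Set.nodup_update s _ hs)

theorem lex_inter_eq_filter (whs : List (List (String × Int))) (s : List String) (k : Int)
    (hs : s.Nodup) (hk : 1 ≤ k) :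
    (PySem.List.enumerate whs k).foldl (fun lexicon iwh =>
      if iwh.1 = 0 then (PySem.Dict.mk iwh.2).keys
      else PySem.Set.inter (PySem.Set.ofList lexicon) ((PySem.Dict.mk iwh.2).keys)) s
    = s.filter (fun w => whs.all (fun h => (h.map Prod.fst).contains w)) := by
  induction whs generalizing s k with
  | nil => simp
  | cons h t ih =>
    rw [PySem.List.enumerate_cons]
    simp only [List.foldl_cons, if_neg (by omega : ¬ k = 0)]
    rw [PySem.Set.ofList_eq_self_of_nodup s hs]
    have hinter : PySem.Set.inter s ((PySem.Dict.mk h).keys)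
        = s.filter (fun w => (h.map Prod.fst).contains w) := by
      simp [PySem.Set.inter, PySem.Dict.keys]
    rw [hinter, ih _ (k+1) (List.Nodup.filter _ hs) (by omega), List.filter_filter]
    rw [List.filter_congr]
    intro x _
    simp [Bool.and_comm]

theorem ofList_filter_head (ks0 : List String) (rest : List String) (p : String → Bool)
    (h0 : ks0.Nodup) (hp : ∀ x, p x = true → x ∈ ks0) :
    (PySem.Set.ofList (ks0 ++ rest)).filter p = ks0.filter p := by
  rw [PySem.Set.ofList_append, PySem.Set.ofList_eq_self_of_nodup ks0 h0,
    PySem.Set.update_eq_append_filter, List.filter_append]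
  have : (List.filter p ((PySem.Set.ofList rest).filter (fun y => !PySem.Set.contains ks0 y))) = [] := by
    rw [List.filter_eq_nil_iff]
    intro x hx hpx
    rw [List.mem_filter] at hx
    have hmem := hp x hpx
    have := hx.2
    simp [PySem.Set.contains_eq_listContains] at this
    exact this hmem
  rw [this, List.append_nil]

theorem distribute {ε : Type} (entries : List ε) (c : ε → Bool) (key : ε → String)
    (v : ε → Int → Int) (rows : List (PySem.Dict String Int)) :
    entries.foldl (fun rows e =>
        if c e then
          (PySem.List.enumerate rows 0).map (fun ir => ir.2.insert (key e) (v e ir.1))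
        else rows) rows
      = (PySem.List.enumerate rows 0).map (fun ir =>
          (entries.filter c).foldl (fun d e => d.insert (key e) (v e ir.1)) ir.2) := by
  induction entries generalizing rows with
  | nil =>
    simp only [List.foldl_nil, List.filter_nil]
    exact (PySem.List.map_snd_enumerate rows 0).symm
  | cons e t ih =>
    simp only [List.foldl_cons, List.filter_cons]
    cases hc : c e with
    | false =>
      simp only [Bool.false_eq_true, if_neg, not_false_iff]
      exact ih rows
    | true =>
      simp only [if_pos]
      rw [ih]
      rw [enumerate_map_enumerate]
      rw [List.map_map]
      rfl

theorem enumerate_getElem? {α : Type} (l : List α) (s : Int) (j : Nat) (hj : j < l.length) :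
    (PySem.List.enumerate l s)[j]? = some (s + (j : Int), l[j]) := by
  induction l generalizing s j with
  | nil => simp at hj
  | cons x xs ih =>
    rw [PySem.List.enumerate_cons]
    cases j with
    | zero => simp
    | succ j' =>
      simp only [List.getElem_cons_succ, List.getElem?_cons_succ]
      rw [ih (s+1) j' (by simpa using hj)]
      congr 2
      push_cast
      ring

theorem columns_items (whs : List (List (String × Int))) :
    ((PySem.List.enumerate whs 0).foldl (fun cols ih =>
        (PySem.Dict.mk ih.2).items.foldl (fun cols wc =>
          cols.modify wc.1 [] (fun l => l ++ [(ih.1, wc.2)])) cols)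
        (PySem.Dict.empty : PySem.Dict String (List (Int × Int)))).items
      = (PySem.Set.ofList (whs.flatMap (fun h => h.map Prod.fst))).map
          (fun w => (w, pvColList whs 0 w)) := by
  rw [PySem.Dict.items_eq_map_keys _ (columns_keys_nodup whs) []]
  rw [columns_keys]
  exact List.map_congr_left (fun w _ => by rw [columns_getD])

theorem final_rows (whs : List (List (String × Int))) (lex : List String)
    (hlex : lex.Nodup) (hpre : ∀ h ∈ whs, (h.map Prod.fst).Nodup) :
    whs.map (fun word_hist =>
        (lex.foldl (fun jh word => jh.insert word ((PySem.Dict.mk word_hist).getD word 0))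
          PySem.Dict.empty).items)
      = (PySem.List.enumerate (List.replicate whs.length (PySem.Dict.empty : PySem.Dict String Int)) 0).map
          (fun ir =>
            ((lex.map (fun w => (w, pvColList whs 0 w))).foldl
              (fun d e => d.insert e.1 ((PySem.Dict.ofList e.2).getD ir.1 0)) ir.2).items) := by
  apply List.ext_getElem
  · simp [PySem.List.length_enumerate]
  intro j h1 h2
  have hj : j < whs.length := by simpa using h1
  have hj' : j < (List.replicate whs.length (PySem.Dict.empty : PySem.Dict String Int)).length := by
    simpa using hj
  have he := enumerate_getElem? (List.replicate whs.length (PySem.Dict.empty : PySem.Dict String Int)) 0 j hj'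
  rw [List.getElem?_eq_getElem (by simpa using hj')] at he
  simp only [List.getElem_map]
  rw [Option.some_inj.1 he, List.getElem_replicate]
  dsimp only
  -- A side
  have hA := PySem.Dict.items_foldl_insert_fresh lex (fun w => w)
    (fun w => (PySem.Dict.mk whs[j]).getD w 0) PySem.Dict.empty
    (fun a _ => PySem.Dict.contains_empty a) (by simpa using hlex)
  simp only [show (PySem.Dict.empty : PySem.Dict String Int).items = [] from rfl, List.nil_append] at hA
  rw [hA]
  -- B side
  have hB := PySem.Dict.items_foldl_insert_fresh (lex.map (fun w => (w, pvColList whs 0 w)))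
    Prod.fst (fun e => (PySem.Dict.ofList e.2).getD (0 + (j : Int)) 0) PySem.Dict.empty
    (fun a _ => PySem.Dict.contains_empty a.1)
    (by
      have hcmp : (Prod.fst ∘ fun w => (w, pvColList whs 0 w)) = fun w => (w : String) := rfl
      simpa [hcmp] using hlex)
  simp only [show (PySem.Dict.empty : PySem.Dict String Int).items = [] from rfl, List.nil_append] at hB
  rw [hB, List.map_map]
  apply List.map_congr_left
  intro w _
  simp only [Function.comp_def]
  rw [dict_ofList_eq_mk _ (pvColList_fst_nodup whs 0 w hpre)]
  rw [pvColList_getD whs 0 j w hpre hj]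

theorem join_word_hists_agree (whs : List (List (String × Int))) (union : Bool)
    (hpre : ∀ h ∈ whs, (h.map Prod.fst).Nodup) :
    join_word_hists whs union = join_word_hists_alt whs union := by
  by_cases hnil : whs = []
  · subst hnil; rfl
  · simp only [join_word_hists, join_word_hists_alt, if_neg hnil]
    rw [PySem.List.foldl_append_singleton_eq_map, List.nil_append]
    rw [distribute _ (fun e => union || e.2.length == whs.length) Prod.fst
      (fun e i => (PySem.Dict.ofList e.2).getD i 0), List.map_map, columns_items]
    rw [List.filter_map]
    cases union with
    | true =>
      simp only [Bool.true_or, if_true, Function.comp_def, List.filter_true]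
      rw [lex_union_eq_update whs [] List.nodup_nil, PySem.Set.update_nil_left]
      exact final_rows whs _ (PySem.Set.nodup_ofList _) hpre
    | false =>
      simp only [Bool.false_or, Bool.false_eq_true, if_false, Function.comp_def]
      cases whs with
      | nil => exact absurd rfl hnil
      | cons h0 rest =>
        have hh0 : (h0.map Prod.fst).Nodup := hpre h0 (by simp)
        have hstep1 : ∀ x, ((pvColList (h0 :: rest) 0 x).length == (h0 :: rest).length)
            = (h0 :: rest).all (fun h => (h.map Prod.fst).contains x) := by
          intro x
          rw [pvColList_length _ 0 _ hpre]
          cases hall : (h0 :: rest).all (fun h => (h.map Prod.fst).contains x) with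
          | true =>
            have := List.all_eq_true.1 hall
            rw [List.countP_eq_length.2 this]
            simp
          | false =>
            have hne : (h0 :: rest).countP (fun h => (h.map Prod.fst).contains x)
                ≠ (h0 :: rest).length := by
              intro he
              have hto := List.countP_eq_length.1 he
              rw [List.all_eq_true.2 hto] at hall
              simp at hall
            exact beq_eq_false_iff_ne.2 hne
        have hlexB :
            List.filter (fun x => (pvColList (h0 :: rest) 0 x).length == (h0 :: rest).length)
              (PySem.Set.ofList ((h0 :: rest).flatMap (fun h => h.map Prod.fst)))
            = (h0.map Prod.fst).filter
                (fun w => rest.all (fun h => (h.map Prod.fst).contains w)) := by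
          rw [List.filter_congr (fun x _ => hstep1 x)]
          rw [List.flatMap_cons]
          rw [ofList_filter_head _ _ _ hh0 ?hp]
          case hp =>
            intro x hpx
            rw [List.all_cons, Bool.and_eq_true] at hpx
            have := hpx.1
            simpa using this
          apply List.filter_congr
          intro x hx
          rw [List.all_cons]
          have hcx : (h0.map Prod.fst).contains x = true := by simpa using hx
          rw [hcx, Bool.true_and]
        rw [hlexB]
        rw [PySem.List.enumerate_cons]
        simp only [List.foldl_cons]
        simp only [if_true]
        rw [lex_inter_eq_filter rest _ (0+1) (by simpa [PySem.Dict.keys] using hh0) (by omega)]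
        have hkeys0 : ({ items := h0 } : PySem.Dict String Int).keys = h0.map Prod.fst := by
          simp [PySem.Dict.keys]
        rw [hkeys0]
        exact final_rows _ _ (List.Nodup.filter _ hh0) hpre

-- ===== VERDICT (by name: the statement is the Claim_ definition above) =====
theorem join_word_hists_spec : Claim_equal_join_word_hists := by
  intro word_hists union _ hpre
  unfold Spec_join_word_hists
  exact join_word_hists_agree word_hists union hpre
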